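-- pv_equiv track=rewrite | github.com/Ajapaik/ajapaik-web | ajapaik/ajapaik/tartunlp_translate/nmt.py | getConf
-- ===== SOURCE A (Python) =====
-- supportedStyles = {"os", "un", "dg", "jr", "ep", "pc", "em", "nc"}
--
-- supportedOutLangs = {"et", "lv", "en", "ru", "fi", "lt", "de"}
--
-- extraSupportedOutLangs = {
--     "est": "et",
--     "lav": "lv",
--     "eng": "en",
--     "rus": "ru",
--     "fin": "fi",
--     "lit": "lt",
--     "ger": "de",
-- }
--
-- defaultStyle = "nc"
--
-- defaultOutLang = "en"
--
-- def getConf(rawConf):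
--     style = defaultStyle
--     outlang = defaultOutLang
--
--     for field in rawConf.split(","):
--         if field in supportedStyles:
--             style = field
--         if field in supportedOutLangs:
--             outlang = field
--         if field in extraSupportedOutLangs:
--             outlang = extraSupportedOutLangs[field]
--
--     return style, outlang
-- ===== SOURCE B (Python) =====
-- supportedStyles = {"os", "un", "dg", "jr", "ep", "pc", "em", "nc"}
--
-- supportedOutLangs = {"et", "lv", "en", "ru", "fi", "lt", "de"}
--
-- extraSupportedOutLangs = {
--     "est": "et",
--     "lav": "lv",
--     "eng": "en",
--     "rus": "ru",
--     "fin": "fi",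
--     "lit": "lt",
--     "ger": "de",
-- }
--
-- defaultStyle = "nc"
--
-- defaultOutLang = "en"
--
--
-- def getConf(rawConf):
--     fields = rawConf.split(",")
--     # style: last field that is a supported style
--     style = next((f for f in reversed(fields) if f in supportedStyles), defaultStyle)
--     # outlang: last field that is a supported output language or an alias of one
--     hit = next((f for f in reversed(fields)
--                 if f in supportedOutLangs or f in extraSupportedOutLangs), None)
--     if hit is None:
--         outlang = defaultOutLang
--     elif hit in supportedOutLangs:
--         outlang = hit
--     else:
--         outlang = extraSupportedOutLangs[hit]
--     return style, outlang
-- ===== Notes on version B (the rewrite author's own statement) =====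
-- stated objective: alternative
-- what changed: Replaces the single forward accumulating loop with two independent last-match selections: a reverse scan picking the last supported style and a reverse scan picking the last field that is a language or language alias (translated through the alias table).
import Mathlib
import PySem

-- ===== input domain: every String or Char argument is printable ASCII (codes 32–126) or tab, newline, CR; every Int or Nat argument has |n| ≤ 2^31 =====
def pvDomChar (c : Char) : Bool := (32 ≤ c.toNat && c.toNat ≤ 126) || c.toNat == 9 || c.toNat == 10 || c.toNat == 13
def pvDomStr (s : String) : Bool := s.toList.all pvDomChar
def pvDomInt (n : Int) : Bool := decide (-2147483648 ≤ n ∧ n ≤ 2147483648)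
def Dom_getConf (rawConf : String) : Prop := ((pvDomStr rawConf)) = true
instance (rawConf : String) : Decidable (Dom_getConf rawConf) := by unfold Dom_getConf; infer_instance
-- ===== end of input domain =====

-- B replaces A's single accumulating forward loop by two independent reverse
-- last-match selections (same cost, different decomposition).

-- shared module-level constants
def supportedStyles : PySem.Set String :=
  PySem.Set.ofList ["os", "un", "dg", "jr", "ep", "pc", "em", "nc"]

def supportedOutLangs : PySem.Set String :=
  PySem.Set.ofList ["et", "lv", "en", "ru", "fi", "lt", "de"]

def extraSupportedOutLangs : PySem.Dict String String :=
  PySem.Dict.ofList [("est", "et"), ("lav", "lv"), ("eng", "en"), ("rus", "ru"),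
                     ("fin", "fi"), ("lit", "lt"), ("ger", "de")]

def defaultStyle : String := "nc"

def defaultOutLang : String := "en"

-- ===== PORT A =====
def getConf (rawConf : String) : String × String :=
  -- split? with a nonempty separator always returns some
  let fields := (PySem.Str.split? rawConf ",").getD []
  fields.foldl
    (fun (acc : String × String) field =>
      let style := if supportedStyles.contains field then field else acc.1
      let outlang := if supportedOutLangs.contains field then field else acc.2
      -- extraSupportedOutLangs[field]: contains was just checked, so get? is some
      let outlang := if extraSupportedOutLangs.contains field then
          (extraSupportedOutLangs.get? field).getD outlang else outlang
      (style, outlang))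
    (defaultStyle, defaultOutLang)

-- ===== PORT B =====
def getConf_alt (rawConf : String) : String × String :=
  let fields := (PySem.Str.split? rawConf ",").getD []
  let style := (fields.reverse.find? (fun f => supportedStyles.contains f)).getD defaultStyle
  let outlang :=
    match fields.reverse.find?
        (fun f => supportedOutLangs.contains f || extraSupportedOutLangs.contains f) with
    | none => defaultOutLang
    | some hit =>
        if supportedOutLangs.contains hit then hit
        else (extraSupportedOutLangs.get? hit).getD defaultOutLang
  (style, outlang)

-- ===== PRECONDITION & SPEC =====
def Spec_getConf (rawConf : String) (out : String × String) : Prop := out = getConf_alt rawConf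
instance (rawConf : String) (out : String × String) : Decidable (Spec_getConf rawConf out) := by unfold Spec_getConf; infer_instance

-- ===== CLAIM (what is proved, stated in full; the proofs are below) =====
def Claim_equal_getConf : Prop := ∀ (rawConf : String), Dom_getConf rawConf → Spec_getConf rawConf (getConf rawConf)

-- ===== LEMMAS AND PROOFS =====

lemma supportedOutLangs_eq :
    supportedOutLangs = ["et", "lv", "en", "ru", "fi", "lt", "de"] := by rfl

lemma lang_disjoint (f : String) (h : f ∈ supportedOutLangs) :
    extraSupportedOutLangs.contains f = false := by
  rw [supportedOutLangs_eq] at h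
  simp only [List.mem_cons, List.not_mem_nil, or_false] at h
  rcases h with rfl | rfl | rfl | rfl | rfl | rfl | rfl <;> rfl

lemma extra_get_isSome (f : String) (h : extraSupportedOutLangs.contains f = true) :
    ∃ w, extraSupportedOutLangs.get? f = some w := by
  rw [PySem.Dict.contains_eq_isSome_get?] at h
  exact Option.isSome_iff_exists.mp h

lemma fold_eq (fields : List String) (st ol : String) :
    fields.foldl
      (fun (acc : String × String) field =>
        let style := if supportedStyles.contains field then field else acc.1
        let outlang := if supportedOutLangs.contains field then field else acc.2
        let outlang := if extraSupportedOutLangs.contains field then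
            (extraSupportedOutLangs.get? field).getD outlang else outlang
        (style, outlang))
      (st, ol)
    = ((fields.reverse.find? (fun f => supportedStyles.contains f)).getD st,
       match fields.reverse.find?
           (fun f => supportedOutLangs.contains f || extraSupportedOutLangs.contains f) with
       | none => ol
       | some hit =>
           if supportedOutLangs.contains hit then hit
           else (extraSupportedOutLangs.get? hit).getD ol) := by
  induction fields generalizing st ol with
  | nil => rfl
  | cons f rest ih =>
    simp only [List.foldl_cons, List.reverse_cons, List.find?_append, ih, Prod.mk.injEq]
    refine ⟨?_, ?_⟩
    · cases hs : rest.reverse.find? (fun f => supportedStyles.contains f) with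
      | some v => simp
      | none =>
        simp only [Option.none_or, List.find?]
        by_cases h1 : f ∈ supportedStyles <;> simp [h1]
    · cases hl : rest.reverse.find?
          (fun f => supportedOutLangs.contains f || extraSupportedOutLangs.contains f) with
      | some v =>
        simp only [Option.some_or]
        have hv := List.find?_some hl
        by_cases hsv : v ∈ supportedOutLangs
        · simp [hsv]
        · simp only [Bool.or_eq_true] at hv
          rcases hv with hv | hv
          · exact absurd (by simpa using hv) hsv
          · obtain ⟨w, hw⟩ := extra_get_isSome v hv
            simp [hsv, hw]
      | none =>
        simp only [Option.none_or, List.find?]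
        by_cases h2 : f ∈ supportedOutLangs
        · have h3 := lang_disjoint f h2
          simp [h2, h3]
        · by_cases h3 : extraSupportedOutLangs.contains f = true <;> simp [h2, h3]

-- ===== VERDICT (by name: the statement is the Claim_ definition above) =====
theorem getConf_spec : Claim_equal_getConf := by
  intro rawConf _
  unfold Spec_getConf getConf getConf_alt
  simp only [fold_eq]
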